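-- pv_equiv track=rewrite | github.com/pypi-data/pypi-mirror-113 | packages/sequencegenerator/sequencegenerator-0.3.0.tar.gz/sequencegenerator-0.3.0/sequencegenerator/generatePool.py | calculate_inverted_repeats
-- ===== SOURCE A (Python) =====
-- import random, math
--
-- def reverse_seq(string):
--     return string[::-1]
--
-- def compliment(string):
--     new_string = ''
--     for letter in string:
--         if letter == 'A':
--             new_string+='T'
--         if letter == 'T':
--             new_string+='A'
--         if letter == 'C':
--             new_string+='G'
--         if letter == 'G':
--             new_string+='C'
--     return new_string
--
-- def calculate_inverted_repeats(my_inital_seq, minimum_repeat_length):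
--     inverted_repeat_match_counter = 0
--     max_possible_overlap = math.floor(len(my_inital_seq) / 2) - 1
--     for i in range(minimum_repeat_length,max_possible_overlap+1):
--         for start_position in range(len(my_inital_seq)-((i)+(i-1))):
--             inverted_repeat_to_test_downstream = compliment(reverse_seq(my_inital_seq[start_position:start_position+i]))
--             downstream_seq = my_inital_seq[start_position+i:]
--             if inverted_repeat_to_test_downstream in downstream_seq:
--                 inverted_repeat_match_counter+=1
--     return inverted_repeat_match_counter
-- ===== SOURCE B (Python) =====
-- def calculate_inverted_repeats(my_inital_seq, minimum_repeat_length):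
--     comp = {'A': 'T', 'T': 'A', 'C': 'G', 'G': 'C'}
--     s = my_inital_seq
--     n = len(s)
--     hi = n // 2 - 1
--     if minimum_repeat_length > hi:
--         return 0
--     total = 0
--     for start in range(n - 2 * minimum_repeat_length + 1):
--         top = min(hi, (n - start) // 2)
--         rc = ''.join(comp[c] for c in reversed(s[start:start + minimum_repeat_length]) if c in comp)
--         for i in range(minimum_repeat_length, top + 1):
--             if i > minimum_repeat_length:
--                 c = s[start + i - 1]
--                 rc = comp.get(c, '') + rc
--             if s.find(rc, start + i) != -1:
--                 total += 1
--     return total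
-- ===== Notes on version B (the rewrite author's own statement) =====
-- stated objective: alternative
-- what changed: B iterates start-position outer / window-length inner, maintains the reverse-complement incrementally by prepending one complemented character per step instead of re-slicing and re-complementing the whole window for every pair, and tests the downstream occurrence with s.find(rc, start+i) instead of building the downstream suffix slice and using 'in'.
-- outside the precondition, e.g. on calculate_inverted_repeats('ACGT', -1): A returns 13, B returns 9; on calculate_inverted_repeats('ACGTAC', -2): A returns 30, B raises IndexError
import Mathlib
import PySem

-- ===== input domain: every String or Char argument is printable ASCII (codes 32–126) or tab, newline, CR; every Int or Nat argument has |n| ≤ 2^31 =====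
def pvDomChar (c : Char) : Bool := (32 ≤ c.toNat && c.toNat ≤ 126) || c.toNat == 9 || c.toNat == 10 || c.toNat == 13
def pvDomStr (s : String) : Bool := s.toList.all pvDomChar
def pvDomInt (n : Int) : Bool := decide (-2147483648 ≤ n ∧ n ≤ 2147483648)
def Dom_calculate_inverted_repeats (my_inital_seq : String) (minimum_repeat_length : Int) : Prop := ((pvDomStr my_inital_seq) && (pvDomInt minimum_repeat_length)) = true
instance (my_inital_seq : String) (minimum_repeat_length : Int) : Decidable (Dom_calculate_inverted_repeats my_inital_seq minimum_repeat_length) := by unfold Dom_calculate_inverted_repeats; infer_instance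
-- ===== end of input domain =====

-- One honest line: B iterates start-outer/length-inner, maintains the reverse complement
-- incrementally (prepending one complemented char) and uses find(rc, start+i) instead of
-- re-slicing+re-complementing each window and slicing the downstream suffix (alternative algorithm).

-- ===== PORT A =====
def reverse_seq (string : String) : String :=
  (PySem.Str.slice? string none none (-1)).getD ""   -- s[::-1]; slice? is some for any step != 0

def compliment (string : String) : String :=
  String.ofList (string.toList.foldl (fun new_string letter =>
    let ns1 := if letter = 'A' then new_string ++ ['T'] else new_string
    let ns2 := if letter = 'T' then ns1 ++ ['A'] else ns1
    let ns3 := if letter = 'C' then ns2 ++ ['G'] else ns2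
    if letter = 'G' then ns3 ++ ['C'] else ns3) [])

def calculate_inverted_repeats (my_inital_seq : String) (minimum_repeat_length : Int) : Int :=
  -- math.floor(len(s)/2) equals integer floor division exactly for machine string lengths
  let max_possible_overlap : Int := PySem.Int.floordiv (PySem.Str.len my_inital_seq) 2 - 1
  (PySem.List.pyRange minimum_repeat_length (max_possible_overlap + 1)).foldl (fun cnt i =>
    (PySem.List.pyRange 0 (PySem.Str.len my_inital_seq - (i + (i - 1)))).foldl (fun cnt start_position =>
      let inverted_repeat_to_test_downstream :=
        compliment (reverse_seq (PySem.Str.slice my_inital_seq (some start_position) (some (start_position + i))))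
      let downstream_seq := PySem.Str.slice my_inital_seq (some (start_position + i)) none
      if PySem.Str.isIn inverted_repeat_to_test_downstream downstream_seq then cnt + 1 else cnt) cnt) 0

-- ===== PORT B =====
def pvComp : PySem.Dict Char Char := PySem.Dict.ofList [('A','T'),('T','A'),('C','G'),('G','C')]

def calculate_inverted_repeats_alt (my_inital_seq : String) (minimum_repeat_length : Int) : Int :=
  let n : Int := PySem.Str.len my_inital_seq
  let hi : Int := PySem.Int.floordiv n 2 - 1
  if minimum_repeat_length > hi then 0 else
  (PySem.List.pyRange 0 (n - 2 * minimum_repeat_length + 1)).foldl (fun total start =>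
    let top : Int := min hi (PySem.Int.floordiv (n - start) 2)
    let rc0 : List Char :=
      ((PySem.Str.slice my_inital_seq (some start) (some (start + minimum_repeat_length))).toList.reverse).filterMap
        (fun c => pvComp.get? c)
    ((PySem.List.pyRange minimum_repeat_length (top + 1)).foldl (fun st i =>
        let rc : List Char :=
          if minimum_repeat_length < i then
            -- s[start + i - 1]: in range for every i this loop reaches (Python raises only outside Pre_)
            match pvComp.get? ((PySem.List.pyGet? my_inital_seq.toList (start + i - 1)).getD ' ') with
            | some d => d :: st.2
            | none => st.2
          else st.2
        (if PySem.Str.findFrom my_inital_seq (String.ofList rc) (start + i) ≠ -1 then st.1 + 1 else st.1, rc))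
      ((total : Int), rc0)).1) 0

-- ===== PRECONDITION & SPEC =====
-- Pre_ excludes negative minimum_repeat_length: a meaningless repeat length on which A's loop
-- slices windows of negative size through Python's negative-index wraparound and the natural B
-- either raises IndexError or counts differently.
def Pre_calculate_inverted_repeats (my_inital_seq : String) (minimum_repeat_length : Int) : Prop :=
  0 ≤ minimum_repeat_length
instance (my_inital_seq : String) (minimum_repeat_length : Int) : Decidable (Pre_calculate_inverted_repeats my_inital_seq minimum_repeat_length) := by unfold Pre_calculate_inverted_repeats; infer_instance
def pvWitness_calculate_inverted_repeats : String × Int := ("ACGTACGT", 1)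

def Spec_calculate_inverted_repeats (my_inital_seq : String) (minimum_repeat_length : Int) (out : Int) : Prop := out = calculate_inverted_repeats_alt my_inital_seq minimum_repeat_length
instance (my_inital_seq : String) (minimum_repeat_length : Int) (out : Int) : Decidable (Spec_calculate_inverted_repeats my_inital_seq minimum_repeat_length out) := by unfold Spec_calculate_inverted_repeats; infer_instance

-- ===== CLAIM (what is proved, stated in full; the proofs are below) =====
def Claim_equal_calculate_inverted_repeats : Prop := ∀ (my_inital_seq : String) (minimum_repeat_length : Int), Dom_calculate_inverted_repeats my_inital_seq minimum_repeat_length → Pre_calculate_inverted_repeats my_inital_seq minimum_repeat_length → Spec_calculate_inverted_repeats my_inital_seq minimum_repeat_length (calculate_inverted_repeats my_inital_seq minimum_repeat_length)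


-- ===== LEMMAS AND PROOFS =====

-- reverse complement over ACGT (non-ACGT characters dropped), the value both per-pair tests are about
def pvRC (t : List Char) : List Char := t.reverse.filterMap (fun c => pvComp.get? c)
-- the window s[start:start+i] for natural indices
def pvWinN (cs : List Char) (a i : Nat) : List Char := (cs.drop a).take i
-- the common per-pair indicator: 1 iff the reverse complement of the window occurs downstream
def pvChi (cs : List Char) (i start : Int) : Int :=
  if pvRC (pvWinN cs start.toNat i.toNat) <:+: cs.drop (start.toNat + i.toNat) then 1 else 0

theorem pvComp_get? (c : Char) :
    pvComp.get? c = if c = 'A' then some 'T' else if c = 'T' then some 'A'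
      else if c = 'C' then some 'G' else if c = 'G' then some 'C' else none := by
  have h : pvComp = { items := [('A','T'),('T','A'),('C','G'),('G','C')] } := rfl
  by_cases hA : c = 'A'
  · subst hA; rfl
  by_cases hT : c = 'T'
  · subst hT; rfl
  by_cases hC : c = 'C'
  · subst hC; rfl
  by_cases hG : c = 'G'
  · subst hG; rfl
  rw [h, if_neg hA, if_neg hT, if_neg hC, if_neg hG]
  simp [PySem.Dict.get?_mk_cons, Ne.symm hA, Ne.symm hT, Ne.symm hC, Ne.symm hG]
  rfl

theorem pvCompliment_step (acc : List Char) (c : Char) :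
    (let ns1 := if c = 'A' then acc ++ ['T'] else acc
     let ns2 := if c = 'T' then ns1 ++ ['A'] else ns1
     let ns3 := if c = 'C' then ns2 ++ ['G'] else ns2
     if c = 'G' then ns3 ++ ['C'] else ns3) = acc ++ (pvComp.get? c).toList := by
  by_cases hA : c = 'A'
  · subst hA; simp [pvComp_get?]
  by_cases hT : c = 'T'
  · subst hT; simp [pvComp_get?]
  by_cases hC : c = 'C'
  · subst hC; simp [pvComp_get?]
  by_cases hG : c = 'G'
  · subst hG; simp [pvComp_get?]
  simp [pvComp_get?, hA, hT, hC, hG]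

theorem pvCompliment_toList (x : String) :
    (compliment x).toList = x.toList.filterMap (fun c => pvComp.get? c) := by
  unfold compliment
  rw [String.toList_ofList,
      PySem.List.foldl_congr_mem' _ _ (fun acc c => acc ++ (pvComp.get? c).toList) _
        (fun c _ acc => pvCompliment_step acc c),
      PySem.List.foldl_append_eq_flatMap, List.filterMap_eq_flatMap_toList]
  simp

theorem pvReverse_seq_eq (x : String) : reverse_seq x = String.ofList x.toList.reverse := by
  unfold reverse_seq
  rw [PySem.Str.slice?_none_none_neg_one]
  rfl

theorem pvWin_slice (cs : List Char) (start i : Int) (h0 : 0 ≤ start) (h1 : 0 ≤ i) :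
    PySem.List.slice cs (some start) (some (start + i)) = pvWinN cs start.toNat i.toNat := by
  rw [PySem.List.slice_toNat cs h0 (by omega)]
  unfold pvWinN
  congr 1
  omega

-- A's per-pair test equals the common indicator's condition
theorem pvPairA (s : String) (i st : Int) (hi : 0 ≤ i) (hst : 0 ≤ st) :
    (PySem.Str.isIn
        (compliment (reverse_seq (PySem.Str.slice s (some st) (some (st + i)))))
        (PySem.Str.slice s (some (st + i)) none) = true)
      ↔ pvRC (pvWinN s.toList st.toNat i.toNat) <:+: s.toList.drop (st.toNat + i.toNat) := by
  rw [PySem.Str.isIn_iff_infix, pvReverse_seq_eq, pvCompliment_toList, String.toList_ofList]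
  rw [PySem.Str.toList_slice, PySem.Str.toList_slice, PySem.Chars.slice_eq_listSlice,
      PySem.Chars.slice_eq_listSlice, pvWin_slice s.toList st i hst hi,
      PySem.List.slice_from s.toList (by omega : (0:Int) ≤ st + i)]
  have : (st + i).toNat = st.toNat + i.toNat := by omega
  rw [this]
  rfl

-- B's per-pair test equals the common indicator's condition
theorem pvPairB (s : String) (rc : List Char) (k : Int) (h0 : 0 ≤ k) (h1 : k ≤ (s.toList.length : Int)) :
    (PySem.Str.findFrom s (String.ofList rc) k ≠ -1)
      ↔ rc <:+: s.toList.drop k.toNat := by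
  rw [PySem.Str.findFrom_eq, String.toList_ofList]
  have hk : k = ((k.toNat : Nat) : Int) := by omega
  rw [hk]
  rw [not_iff_comm, Iff.comm]
  exact PySem.Chars.findFrom_natCast_eq_neg_one_iff s.toList rc k.toNat (by omega)

theorem pvWin_append (cs : List Char) (a j : Nat) (h : a + j < cs.length) :
    pvWinN cs a (j + 1) = pvWinN cs a j ++ [cs[a + j]] := by
  unfold pvWinN
  rw [List.take_add_one]
  congr 1
  have : (cs.drop a)[j]? = some cs[a + j] := by
    rw [List.getElem?_drop]
    exact List.getElem?_eq_getElem h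
  simp [this]

theorem pvRC_append (t : List Char) (c : Char) :
    pvRC (t ++ [c]) = match pvComp.get? c with
      | some d => d :: pvRC t
      | none => pvRC t := by
  unfold pvRC
  rw [List.reverse_append]
  simp [List.filterMap_cons]
  cases pvComp.get? c <;> simp

theorem pvIco_insert_top {a b : Int} (h : a ≤ b) :
    Finset.Ico a (b + 1) = insert b (Finset.Ico a b) := by
  ext x; simp [Finset.mem_Ico]; omega

theorem pvIco_insert_bot {a b : Int} (h : a < b) :
    Finset.Ico a b = insert a (Finset.Ico (a + 1) b) := by
  ext x; simp [Finset.mem_Ico]; omega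

theorem pvRange_map_sum (g : Int → Int) (a b : Int) :
    ((PySem.List.pyRange a b).map g).sum = ∑ i ∈ Finset.Ico a b, g i := by
  by_cases h : a ≤ b
  · obtain ⟨k, hk⟩ : ∃ k : Nat, b = a + k := ⟨(b - a).toNat, by omega⟩
    subst hk
    induction k with
    | zero =>
      simp [pysem]
    | succ n ih =>
      have h1 : a ≤ a + (n : Int) := by omega
      rw [show (a + ((n + 1 : Nat) : Int)) = (a + (n : Int)) + 1 by push_cast; ring,
          PySem.List.pyRange_one_succ_right h1, List.map_append, List.sum_append,
          pvIco_insert_top h1, Finset.sum_insert (by simp [Finset.mem_Ico]),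
          ih h1]
      simp [add_comm]
  · have h' : b ≤ a := by omega
    simp [pysem, h']

-- loop invariant of B's inner loop: rc always holds the reverse complement of the current window
theorem pvInner (s : String) (m start top : Int)
    (hm : 0 ≤ m) (hst : 0 ≤ start)
    (htop : 2 * top ≤ (s.toList.length : Int) - start) :
    ∀ (k : Nat) (j t : Int), m ≤ j → (top + 1 - j).toNat = k →
    ((PySem.List.pyRange j (top + 1)).foldl
        (fun st i =>
          let rc : List Char :=
            if m < i then
              match pvComp.get? ((PySem.List.pyGet? s.toList (start + i - 1)).getD ' ') with
              | some d => d :: st.2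
              | none => st.2
            else st.2
          (if PySem.Str.findFrom s (String.ofList rc) (start + i) ≠ -1 then st.1 + 1 else st.1, rc))
        (t, pvRC (pvWinN s.toList start.toNat (max m (j - 1)).toNat))).1
      = t + ∑ i ∈ Finset.Ico j (top + 1), pvChi s.toList i start := by
  intro k
  induction k with
  | zero =>
    intro j t hmj hk
    have h1 : top + 1 ≤ j := by omega
    simp [pysem, h1]
  | succ n ih =>
    intro j t hmj hk
    have hjt : j < top + 1 := by omega
    rw [PySem.List.pyRange_one_cons hjt, List.foldl_cons]
    dsimp only
    have hwin : (if m < j then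
          match pvComp.get? ((PySem.List.pyGet? s.toList (start + j - 1)).getD ' ') with
          | some d => d :: pvRC (pvWinN s.toList start.toNat (max m (j - 1)).toNat)
          | none => pvRC (pvWinN s.toList start.toNat (max m (j - 1)).toNat)
        else pvRC (pvWinN s.toList start.toNat (max m (j - 1)).toNat))
        = pvRC (pvWinN s.toList start.toNat j.toNat) := by
      by_cases hmj' : m < j
      · rw [if_pos hmj']
        have hidx : start + j - 1 = ((start.toNat + (j - 1).toNat : Nat) : Int) := by omega
        have hlt : start.toNat + (j - 1).toNat < s.toList.length := by omega
        rw [hidx, PySem.List.pyGet?_natCast, List.getElem?_eq_getElem hlt]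
        have hmax : (max m (j - 1)).toNat = (j - 1).toNat := by omega
        have hj' : j.toNat = (j - 1).toNat + 1 := by omega
        rw [hmax, hj', pvWin_append s.toList start.toNat (j - 1).toNat hlt, pvRC_append]
        simp only [Option.getD_some]
      · rw [if_neg hmj']
        have hmax : max m (j - 1) = j := by omega
        rw [hmax]
    rw [hwin]
    have hjlen : start + j ≤ (s.toList.length : Int) := by omega
    have htest : (PySem.Str.findFrom s (String.ofList (pvRC (pvWinN s.toList start.toNat j.toNat))) (start + j) ≠ -1)
        ↔ pvRC (pvWinN s.toList start.toNat j.toNat) <:+: s.toList.drop (start.toNat + j.toNat) := by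
      have h := pvPairB s (pvRC (pvWinN s.toList start.toNat j.toNat)) (start + j) (by omega) hjlen
      have hcast : (start + j).toNat = start.toNat + j.toNat := by omega
      rw [hcast] at h
      exact h
    rw [if_congr htest rfl rfl]
    have hstep : (if pvRC (pvWinN s.toList start.toNat j.toNat) <:+: s.toList.drop (start.toNat + j.toNat)
          then t + 1 else t) = t + pvChi s.toList j start := by
      unfold pvChi
      split_ifs <;> ring
    rw [hstep]
    have hmax2 : (max m (j + 1 - 1)).toNat = j.toNat := by omega
    have hih := ih (j + 1) (t + pvChi s.toList j start) (by omega) (by omega)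
    rw [hmax2] at hih
    rw [hih, pvIco_insert_bot hjt, Finset.sum_insert (by simp [Finset.mem_Ico])]
    ring

theorem pvAval (s : String) (m : Int) (hm : 0 ≤ m) :
    calculate_inverted_repeats s m
      = ∑ i ∈ Finset.Ico m (PySem.Int.floordiv (PySem.Str.len s) 2 - 1 + 1),
          ∑ st ∈ Finset.Ico 0 (PySem.Str.len s - 2 * i + 1), pvChi s.toList i st := by
  unfold calculate_inverted_repeats
  dsimp only
  rw [PySem.List.foldl_congr_mem' _ _
      (fun cnt i => cnt + ((PySem.List.pyRange 0 (PySem.Str.len s - (i + (i - 1)))).countP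
        (fun st => PySem.Str.isIn
          (compliment (reverse_seq (PySem.Str.slice s (some st) (some (st + i)))))
          (PySem.Str.slice s (some (st + i)) none)) : Int))
      _ (fun i _ cnt => PySem.List.foldl_if_add_one _ _ cnt)]
  rw [PySem.List.foldl_add, zero_add, pvRange_map_sum]
  apply Finset.sum_congr rfl
  intro i hi
  rw [Finset.mem_Ico] at hi
  rw [← PySem.List.sum_map_ite_one_zero
        (fun st => PySem.Str.isIn
          (compliment (reverse_seq (PySem.Str.slice s (some st) (some (st + i)))))
          (PySem.Str.slice s (some (st + i)) none))
        (PySem.List.pyRange 0 (PySem.Str.len s - (i + (i - 1))))]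
  rw [pvRange_map_sum]
  have hbnd : PySem.Str.len s - (i + (i - 1)) = PySem.Str.len s - 2 * i + 1 := by ring
  rw [hbnd]
  apply Finset.sum_congr rfl
  intro st hst
  rw [Finset.mem_Ico] at hst
  unfold pvChi
  rw [if_congr (pvPairA s i st (by omega) hst.1) rfl rfl]

theorem pvBval (s : String) (m : Int) (hm : 0 ≤ m)
    (hle : ¬ m > PySem.Int.floordiv (PySem.Str.len s) 2 - 1) :
    calculate_inverted_repeats_alt s m
      = ∑ st ∈ Finset.Ico 0 (PySem.Str.len s - 2 * m + 1),
          ∑ i ∈ Finset.Ico m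
              (min (PySem.Int.floordiv (PySem.Str.len s) 2 - 1)
                   (PySem.Int.floordiv (PySem.Str.len s - st) 2) + 1),
            pvChi s.toList i st := by
  unfold calculate_inverted_repeats_alt
  dsimp only
  rw [if_neg hle]
  have hlen : PySem.Str.len s = (s.toList.length : Int) := PySem.Str.len_eq s
  rw [PySem.List.foldl_congr_mem' _ _
      (fun total st => total + ∑ i ∈ Finset.Ico m
          (min (PySem.Int.floordiv (PySem.Str.len s) 2 - 1)
               (PySem.Int.floordiv (PySem.Str.len s - st) 2) + 1),
        pvChi s.toList i st) _ ?hcong]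
  · rw [PySem.List.foldl_add, zero_add, pvRange_map_sum]
  case hcong =>
    intro st hmem total
    rw [PySem.List.mem_pyRange_one] at hmem
    have h2 : (0:Int) < 2 := by omega
    set top : Int := min (PySem.Int.floordiv (PySem.Str.len s) 2 - 1)
        (PySem.Int.floordiv (PySem.Str.len s - st) 2) with htopdef
    have htop : 2 * top ≤ (s.toList.length : Int) - st := by
      have hd := PySem.Int.floordiv_eq_ediv_of_pos h2 (a := PySem.Str.len s - st)
      rw [htopdef, hd, hlen] at *
      omega
    have hrc0 : ((PySem.Str.slice s (some st) (some (st + m))).toList.reverse).filterMap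
          (fun c => pvComp.get? c)
        = pvRC (pvWinN s.toList st.toNat (max m (m - 1)).toNat) := by
      have hmax : max m (m - 1) = m := by omega
      rw [hmax, PySem.Str.toList_slice, PySem.Chars.slice_eq_listSlice,
          pvWin_slice s.toList st m hmem.1 hm]
      rfl
    rw [hrc0]
    exact pvInner s m st top hm hmem.1 htop ((top + 1 - m).toNat) m total le_rfl rfl

-- ===== VERDICT (by name: the statement is the Claim_ definition above) =====
theorem calculate_inverted_repeats_spec : Claim_equal_calculate_inverted_repeats := by
  intro s m _hdom hpre
  unfold Spec_calculate_inverted_repeats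
  have hm : 0 ≤ m := hpre
  by_cases hcase : m > PySem.Int.floordiv (PySem.Str.len s) 2 - 1
  · rw [pvAval s m hm]
    have hA0 : Finset.Ico m (PySem.Int.floordiv (PySem.Str.len s) 2 - 1 + 1) = ∅ :=
      Finset.Ico_eq_empty (by omega)
    rw [hA0, Finset.sum_empty]
    unfold calculate_inverted_repeats_alt
    dsimp only
    rw [if_pos hcase]
  · rw [pvAval s m hm, pvBval s m hm hcase]
    rw [Finset.sum_comm' (fun i st => ?_)]
    have h2 : (0:Int) < 2 := by omega
    rw [PySem.Int.floordiv_eq_ediv_of_pos h2, PySem.Int.floordiv_eq_ediv_of_pos h2]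
    simp only [Finset.mem_Ico]
    omega
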